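-- pv_equiv track=rewrite | github.com/pypi-data/pypi-mirror-220 | packages/cell-value/cell_value-1.1.3.tar.gz/cell_value-1.1.3/cell_value/__init__.py | check_all_substring_match
-- ===== SOURCE A (Python) =====
-- def check_all_substring_match(a_list, b_list):
--     for a in a_list:
--         found_match = False
--         for b in b_list:
--             if a in b:
--                 found_match = True
--                 break
--         if not found_match:
--             return False
--     return True
-- ===== SOURCE B (Python) =====
-- def check_all_substring_match(a_list, b_list):
--     remaining = set(a_list)
--     for b in b_list:
--         if not remaining:
--             break
--         remaining = {a for a in remaining if a not in b}
--     return not remaining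
-- ===== Notes on version B (the rewrite author's own statement) =====
-- stated objective: alternative
-- what changed: Loops are swapped: instead of scanning all of b_list for each a, B keeps a set of still-unmatched a's (deduplicated once), filters it against each b in a single pass over b_list and stops early once the set is empty.
import Mathlib
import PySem

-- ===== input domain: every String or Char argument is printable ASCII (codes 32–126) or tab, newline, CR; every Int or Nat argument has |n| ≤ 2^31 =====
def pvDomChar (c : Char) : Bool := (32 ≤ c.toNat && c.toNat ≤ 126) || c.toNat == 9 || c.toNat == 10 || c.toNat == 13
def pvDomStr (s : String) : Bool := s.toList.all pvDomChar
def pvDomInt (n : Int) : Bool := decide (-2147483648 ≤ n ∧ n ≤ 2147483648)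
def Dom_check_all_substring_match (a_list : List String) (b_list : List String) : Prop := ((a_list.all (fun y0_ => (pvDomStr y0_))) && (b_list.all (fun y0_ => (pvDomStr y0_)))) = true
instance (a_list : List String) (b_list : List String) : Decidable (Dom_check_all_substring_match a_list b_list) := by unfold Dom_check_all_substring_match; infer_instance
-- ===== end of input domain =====

-- B swaps the loops: it keeps a set of still-unmatched a's, filters it against each b once, and stops early when the set is empty (objective: alternative).

-- ===== PORT A =====
-- inner 'for b in b_list: if a in b: found_match = True; break'
def pvInnerA (a : String) : List String → Bool
  | [] => false
  | b :: bs => if PySem.Str.isIn a b then true else pvInnerA a bs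

def check_all_substring_match (a_list : List String) (b_list : List String) : Bool :=
  match a_list with
  | [] => true
  | a :: rest =>
    if !(pvInnerA a b_list) then false
    else check_all_substring_match rest b_list

-- ===== PORT B =====
-- 'remaining = {a for a in remaining if a not in b}' with break once empty
def pvLoopB (r : PySem.Set String) : List String → PySem.Set String
  | [] => r
  | b :: bs =>
    if r.isEmpty then r
    else pvLoopB (PySem.Set.ofList (r.filter (fun a => !(PySem.Str.isIn a b)))) bs

def check_all_substring_match_alt (a_list : List String) (b_list : List String) : Bool :=
  (pvLoopB (PySem.Set.ofList a_list) b_list).isEmpty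

-- ===== PRECONDITION & SPEC =====
def Spec_check_all_substring_match (a_list : List String) (b_list : List String) (out : Bool) : Prop := out = check_all_substring_match_alt a_list b_list
instance (a_list : List String) (b_list : List String) (out : Bool) : Decidable (Spec_check_all_substring_match a_list b_list out) := by unfold Spec_check_all_substring_match; infer_instance

-- ===== CLAIM (what is proved, stated in full; the proofs are below) =====
def Claim_equal_check_all_substring_match : Prop := ∀ (a_list : List String) (b_list : List String), Dom_check_all_substring_match a_list b_list → Spec_check_all_substring_match a_list b_list (check_all_substring_match a_list b_list)

-- ===== LEMMAS AND PROOFS =====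

theorem pvInnerA_eq_any (a : String) (bs : List String) :
    pvInnerA a bs = bs.any (fun b => PySem.Str.isIn a b) := by
  induction bs with
  | nil => rfl
  | cons b bs ih =>
    cases h : PySem.Str.isIn a b <;> simp [pvInnerA, h, ih]

theorem checkA_eq_all (a_list b_list : List String) :
    check_all_substring_match a_list b_list
      = a_list.all (fun a => b_list.any (fun b => PySem.Str.isIn a b)) := by
  induction a_list with
  | nil => rfl
  | cons a rest ih =>
    show (if !(pvInnerA a b_list) then false
          else check_all_substring_match rest b_list) = _
    rw [pvInnerA_eq_any, ih, List.all_cons]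
    cases hb : b_list.any (fun b => PySem.Str.isIn a b) <;> simp

theorem pvLoopB_empty_iff (bs : List String) (r : PySem.Set String) :
    pvLoopB r bs = [] ↔ ∀ a ∈ r, ∃ b ∈ bs, PySem.Str.isIn a b = true := by
  induction bs generalizing r with
  | nil => simp [pvLoopB]; constructor
           · intro h a ha; simp [h] at ha
           · intro h; cases hr : r with
             | nil => rfl
             | cons x xs => exact absurd (h x (by simp [hr])) (by simp)
  | cons b bs ih =>
    simp only [pvLoopB]
    split_ifs with h
    · rw [List.isEmpty_iff] at h
      subst h; simp
    · rw [ih]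
      constructor
      · intro hf a ha
        cases hin : PySem.Str.isIn a b with
        | true => exact ⟨b, List.mem_cons_self, hin⟩
        | false =>
          have hin2 : (!PySem.Str.isIn a b) = true := by rw [hin]; rfl
          obtain ⟨b', hb', hin'⟩ := hf a
            (by rw [PySem.Set.mem_ofList]; exact List.mem_filter.mpr ⟨ha, hin2⟩)
          exact ⟨b', List.mem_cons_of_mem b hb', hin'⟩
      · intro hall a ha
        rw [PySem.Set.mem_ofList, List.mem_filter] at ha
        obtain ⟨b', hb', hin'⟩ := hall a ha.1
        rcases List.mem_cons.mp hb' with rfl | hmem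
        · have h2 := ha.2
          rw [hin'] at h2
          exact absurd h2 (by decide)
        · exact ⟨b', hmem, hin'⟩

-- ===== VERDICT (by name: the statement is the Claim_ definition above) =====
theorem check_all_substring_match_spec : Claim_equal_check_all_substring_match := by
  intro a_list b_list _dom
  unfold Spec_check_all_substring_match
  rw [Bool.eq_iff_iff, checkA_eq_all]
  unfold check_all_substring_match_alt
  rw [List.isEmpty_iff, pvLoopB_empty_iff]
  simp [PySem.Set.mem_ofList, List.all_eq_true, List.any_eq_true]
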